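-- pv_equiv track=rewrite | github.com/mattlab76/markdown-tool-sublime | edi_markdown_wizard.py | _build_flowchart
-- ===== SOURCE A (Python) =====
-- def _build_flowchart(title, count):
--     lines = []
--     lines.append("### {}\n".format(title))
--     lines.append("```")
--
--     placeholder_idx = 1
--     for i in range(count):
--         placeholder = "${{{}:Schritt {}}}".format(placeholder_idx, i + 1)
--         placeholder_idx += 1
--
--         lines.append("┌─────────────────────┐")
--         lines.append("│  {}      │".format(placeholder))
--         lines.append("└──────────┬──────────┘")
--
--         if i < count - 1:
--             lines.append("           │")
--             lines.append("           ▼")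
--
--     lines.append("```")
--     lines.append("\n$0")
--
--     return "\n".join(lines)
-- ===== SOURCE B (Python) =====
-- def _build_flowchart(title, count):
--     blocks = [
--         "\u250c\u2500\u2500\u2500\u2500\u2500\u2500\u2500\u2500\u2500\u2500\u2500\u2500\u2500\u2500\u2500\u2500\u2500\u2500\u2500\u2500\u2500\u2510\n"
--         "\u2502  ${%d:Schritt %d}      \u2502\n"
--         "\u2514\u2500\u2500\u2500\u2500\u2500\u2500\u2500\u2500\u2500\u2500\u252c\u2500\u2500\u2500\u2500\u2500\u2500\u2500\u2500\u2500\u2500\u2518" % (n, n)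
--         for n in range(1, count + 1)
--     ]
--     body = "\n           \u2502\n           \u25bc\n".join(blocks)
--     parts = ["### %s\n" % title, "```"] + ([body] if blocks else []) + ["```", "\n$0"]
--     return "\n".join(parts)
-- ===== Notes on version B (the rewrite author's own statement) =====
-- stated objective: simpler
-- what changed: Each step becomes one complete three-line block string built by a comprehension over range(1, count+1) (the redundant placeholder_idx counter is gone), the blocks are joined with the arrow-separator string instead of conditionally appending separator lines inside the loop, and the result is assembled by one final join of header, fences and optional body.
import Mathlib
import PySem

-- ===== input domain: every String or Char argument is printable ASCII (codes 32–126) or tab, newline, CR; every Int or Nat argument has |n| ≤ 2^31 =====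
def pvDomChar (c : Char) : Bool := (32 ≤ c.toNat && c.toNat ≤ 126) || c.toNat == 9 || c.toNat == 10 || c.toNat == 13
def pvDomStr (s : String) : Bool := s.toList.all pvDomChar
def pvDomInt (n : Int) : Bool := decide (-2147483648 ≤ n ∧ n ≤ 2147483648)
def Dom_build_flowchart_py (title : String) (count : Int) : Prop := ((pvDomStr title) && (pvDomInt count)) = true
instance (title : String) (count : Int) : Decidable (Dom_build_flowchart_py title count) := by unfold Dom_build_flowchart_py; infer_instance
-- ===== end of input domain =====

-- B replaces A's manual loop (separate placeholder counter, conditional separator appends)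
-- by a comprehension of complete block strings joined with the separator; objective: simpler.

-- ===== PORT A =====
-- literal transliteration of _build_flowchart: list of lines built in a loop
-- with state (lines, placeholder_idx), then "\n".join
def build_flowchart_py (title : String) (count : Int) : String :=
  let lines : List String := ["### " ++ title ++ "\n", "```"]
  let st :=
    (PySem.List.pyRange 0 count 1).foldl
      (fun (st : List String × Int) i =>
        let placeholder :=
          "${" ++ PySem.Int.toStr st.2 ++ ":Schritt " ++ PySem.Int.toStr (i + 1) ++ "}"
        let pidx := st.2 + 1
        let lines := st.1 ++ ["┌─────────────────────┐",
                              "│  " ++ placeholder ++ "      │",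
                              "└──────────┬──────────┘"]
        let lines := if i < count - 1 then lines ++ ["           │", "           ▼"] else lines
        (lines, pidx))
      (lines, 1)
  let lines := st.1 ++ ["```", "\n$0"]
  PySem.Str.join "\n" lines

-- ===== PORT B =====
-- literal transliteration of Source B: block comprehension, separator join, final join
def build_flowchart_py_alt (title : String) (count : Int) : String :=
  let blocks : List String :=
    (PySem.List.pyRange 1 (count + 1) 1).map (fun n =>
      "┌─────────────────────┐\n│  ${" ++ PySem.Int.toStr n ++ ":Schritt "
        ++ PySem.Int.toStr n ++ "}      │\n└──────────┬──────────┘")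
  let body := PySem.Str.join "\n           │\n           ▼\n" blocks
  let parts : List String :=
    ["### " ++ title ++ "\n", "```"]
      ++ (if blocks.isEmpty then [] else [body])
      ++ ["```", "\n$0"]
  PySem.Str.join "\n" parts

-- ===== PRECONDITION & SPEC =====
def Spec_build_flowchart_py (title : String) (count : Int) (out : String) : Prop := out = build_flowchart_py_alt title count
instance (title : String) (count : Int) (out : String) : Decidable (Spec_build_flowchart_py title count out) := by unfold Spec_build_flowchart_py; infer_instance

-- ===== CLAIM (what is proved, stated in full; the proofs are below) =====
def Claim_equal_build_flowchart_py : Prop := ∀ (title : String) (count : Int), Dom_build_flowchart_py title count → Spec_build_flowchart_py title count (build_flowchart_py title count)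

-- ===== LEMMAS AND PROOFS =====

-- the three lines of one box with placeholder number n (A's loop body emits these)
def pvBoxLines (n : Int) : List String :=
  ["┌─────────────────────┐",
   "│  " ++ ("${" ++ PySem.Int.toStr n ++ ":Schritt " ++ PySem.Int.toStr n ++ "}") ++ "      │",
   "└──────────┬──────────┘"]

def pvSepLines : List String := ["           │", "           ▼"]

-- the middle lines A's loop produces for boxes a+1 … a+m (separator after all but the last)
def pvMidA (a : Int) : Nat → List String
  | 0 => []
  | 1 => pvBoxLines (a + 1)
  | (m + 2) => pvBoxLines (a + 1) ++ pvSepLines ++ pvMidA (a + 1) (m + 1)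

-- B's block strings for indices a … a+m-1
def pvBlock (n : Int) : String :=
  "┌─────────────────────┐\n│  ${" ++ PySem.Int.toStr n ++ ":Schritt "
    ++ PySem.Int.toStr n ++ "}      │\n└──────────┬──────────┘"

def pvBlocks (a : Int) : Nat → List String
  | 0 => []
  | m + 1 => pvBlock a :: pvBlocks (a + 1) m

theorem pvMidA_ne_nil (a : Int) (m : Nat) : pvMidA a (m + 1) ≠ [] := by
  cases m <;> simp [pvMidA, pvBoxLines]

-- A's fold characterised
theorem pvFoldA (cnt : Int) (m : Nat) : ∀ (a : Int) (lines0 : List String), cnt = a + m →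
    (PySem.List.pyRange a cnt 1).foldl
      (fun (st : List String × Int) i =>
        let placeholder :=
          "${" ++ PySem.Int.toStr st.2 ++ ":Schritt " ++ PySem.Int.toStr (i + 1) ++ "}"
        let pidx := st.2 + 1
        let lines := st.1 ++ ["┌─────────────────────┐",
                              "│  " ++ placeholder ++ "      │",
                              "└──────────┬──────────┘"]
        let lines := if i < cnt - 1 then lines ++ ["           │", "           ▼"] else lines
        (lines, pidx))
      (lines0, a + 1)
    = (lines0 ++ pvMidA a m, a + m + 1) := by
  induction m with
  | zero =>
      intro a lines0 h
      rw [PySem.List.pyRange_one_eq_nil (by omega)]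
      simp [pvMidA]
  | succ k ih =>
      intro a lines0 h
      rw [PySem.List.pyRange_one_cons (by omega : a < cnt)]
      simp only [List.foldl_cons]
      cases k with
      | zero =>
          have hcond : ¬ a < cnt - 1 := by omega
          rw [PySem.List.pyRange_one_eq_nil (by omega : cnt ≤ a + 1)]
          simp only [List.foldl_nil, hcond, if_false, Prod.mk.injEq]
          refine ⟨by simp [pvMidA, pvBoxLines], by omega⟩
      | succ k' =>
          have hcond : a < cnt - 1 := by omega
          have hrec := ih (a + 1) (lines0 ++ (["┌─────────────────────┐",
              "│  " ++ ("${" ++ PySem.Int.toStr (a+1) ++ ":Schritt " ++ PySem.Int.toStr (a + 1) ++ "}") ++ "      │",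
              "└──────────┬──────────┘"] ++ ["           │", "           ▼"])) (by omega)
          simp only [hcond, if_true, List.append_assoc] at hrec ⊢
          rw [hrec, Prod.mk.injEq]
          refine ⟨?_, by omega⟩
          simp only [pvMidA, pvBoxLines, pvSepLines, List.append_assoc]

-- B's map characterised
theorem pvMapB (m : Nat) : ∀ (a b : Int), b = a + m →
    (PySem.List.pyRange a b 1).map (fun n =>
      "┌─────────────────────┐\n│  ${" ++ PySem.Int.toStr n ++ ":Schritt "
        ++ PySem.Int.toStr n ++ "}      │\n└──────────┬──────────┘")
    = pvBlocks a m := by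
  induction m with
  | zero =>
      intro a b h
      rw [PySem.List.pyRange_one_eq_nil (by omega)]
      rfl
  | succ k ih =>
      intro a b h
      rw [PySem.List.pyRange_one_cons (by omega : a < b)]
      simp only [List.map_cons]
      rw [ih (a + 1) b (by omega)]
      rfl

-- join over an append, both sides nonempty
theorem pvJoinAppend (sep : List Char) (xs ys : List (List Char)) (hx : xs ≠ []) (hy : ys ≠ []) :
    PySem.Chars.join sep (xs ++ ys) = PySem.Chars.join sep xs ++ sep ++ PySem.Chars.join sep ys := by
  induction xs with
  | nil => exact absurd rfl hx
  | cons x xt ih =>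
      cases xt with
      | nil =>
          cases ys with
          | nil => exact absurd rfl hy
          | cons y yt =>
              rw [List.singleton_append, PySem.Chars.join_cons_cons,
                PySem.Chars.join_singleton]
      | cons x2 xt2 =>
          rw [List.cons_append, show (x2 :: xt2) ++ ys = x2 :: (xt2 ++ ys) from rfl,
            PySem.Chars.join_cons_cons, PySem.Chars.join_cons_cons,
            ← List.cons_append, ih (by simp) ]
          simp [List.append_assoc]

-- the crux: A's newline-joined middle lines = B's separator-joined blocks
theorem pvCrux (m : Nat) : ∀ (a : Int),
    PySem.Chars.join "\n".toList ((pvMidA a (m + 1)).map String.toList)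
    = PySem.Chars.join "\n           │\n           ▼\n".toList
        ((pvBlocks (a + 1) (m + 1)).map String.toList) := by
  induction m with
  | zero =>
      intro a
      simp only [pvMidA, pvBlocks, pvBoxLines, pvBlock]
      rw [List.map_cons, List.map_cons, List.map_singleton,
        PySem.Chars.join_cons_cons, PySem.Chars.join_cons_cons, PySem.Chars.join_singleton,
        List.map_singleton, PySem.Chars.join_singleton]
      simp
  | succ k ih =>
      intro a
      have hmid : pvMidA a (k + 2) = pvBoxLines (a + 1) ++ pvSepLines ++ pvMidA (a + 1) (k + 1) := rfl
      have hblk : pvBlocks (a + 1) (k + 2) = pvBlock (a + 1) :: pvBlocks (a + 1 + 1) (k + 1) := rfl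
      rw [hmid, hblk]
      have hb : pvBlocks (a + 1 + 1) (k + 1) ≠ [] := by cases k <;> simp [pvBlocks]
      cases hbe : pvBlocks (a + 1 + 1) (k + 1) with
      | nil => exact absurd hbe hb
      | cons b bt =>
          rw [List.map_cons, List.map_cons, PySem.Chars.join_cons_cons]
          rw [List.map_append, List.map_append]
          rw [pvJoinAppend _ _ _ (by simp [pvBoxLines, pvSepLines]) (by
            have := pvMidA_ne_nil (a + 1) k
            simp [this])]
          rw [pvJoinAppend _ _ _ (by simp [pvBoxLines]) (by simp [pvSepLines])]
          have := ih (a + 1)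
          rw [hbe] at this
          rw [this]
          simp only [pvBoxLines, pvSepLines, pvBlock, List.map_cons,
            PySem.Chars.join_cons_cons]
          simp [List.append_assoc]

-- ===== VERDICT (by name: the statement is the Claim_ definition above) =====
theorem build_flowchart_py_spec : Claim_equal_build_flowchart_py := by
  intro title count _
  unfold Spec_build_flowchart_py build_flowchart_py build_flowchart_py_alt
  by_cases hc : count ≤ 0
  · rw [PySem.List.pyRange_one_eq_nil (by omega : count ≤ 0),
      PySem.List.pyRange_one_eq_nil (by omega : count + 1 ≤ 1)]
    rfl
  · replace hc : 0 < count := by omega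
    have hm : count = 0 + ((count.toNat - 1) + 1 : Nat) := by omega
    have hfold := pvFoldA count ((count.toNat - 1) + 1) 0 ["### " ++ title ++ "\n", "```"] hm
    rw [show (0 : Int) + 1 = 1 from rfl] at hfold
    dsimp only at hfold ⊢
    rw [hfold]
    rw [pvMapB ((count.toNat - 1) + 1) 1 (count + 1) (by omega)]
    have hb : (pvBlocks 1 (count.toNat - 1 + 1)).isEmpty = false := by
      cases h : count.toNat - 1 <;> simp [pvBlocks]
    simp only [hb, Bool.false_eq_true, if_false]
    apply String.toList_inj.mp
    rw [PySem.Str.toList_join, PySem.Str.toList_join]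
    simp only [List.map_append, List.map_cons, List.map_nil]
    rw [List.append_assoc, List.append_assoc]
    rw [pvJoinAppend "\n".toList (("### " ++ title ++ "\n").toList :: ["```".toList])
      ((pvMidA 0 (count.toNat - 1 + 1)).map String.toList ++ ["```".toList, "\n$0".toList])
      (by simp) (by simp)]
    rw [pvJoinAppend "\n".toList ((pvMidA 0 (count.toNat - 1 + 1)).map String.toList)
      ["```".toList, "\n$0".toList]
      (by simpa using pvMidA_ne_nil 0 (count.toNat - 1)) (by simp)]
    have hcx := pvCrux (count.toNat - 1) 0
    rw [show (0 : Int) + 1 = 1 from rfl] at hcx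
    rw [hcx, PySem.Str.toList_join]
    simp only [PySem.Chars.join_cons_cons, PySem.Chars.join_singleton]
    simp [PySem.Chars.join_cons_cons, PySem.Chars.join_singleton, List.append_assoc]
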